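-- pv_equiv track=rewrite | github.com/haolunc/ARC-RL | reference_solutions/solutions/1190e5a7.py | transform
-- ===== SOURCE A (Python) =====
-- def transform(grid):
--     if grid is None:
--         return []
--
--     m = len(grid)
--     if m == 0:
--         return []
--     n = len(grid[0])
--
--     flat = []
--     for r in grid:
--         if len(r) != n:
--             raise ValueError("Input grid is not rectangular.")
--         for v in r:
--             flat.append(int(v))
--     from collections import Counter
--     bg_color = Counter(flat).most_common(1)[0][0]
--
--     horizontal_lines = []
--     for r in range(m):
--         row = grid[r]
--
--         vals = [int(x) for x in row]
--         if len(set(vals)) == 1: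
--             color = vals[0]
--             if color != bg_color:
--                 horizontal_lines.append(r)
--     horizontal_lines.sort()
--
--     vertical_lines = []
--     for c in range(n):
--         col_vals = [int(grid[r][c]) for r in range(m)]
--         if len(set(col_vals)) == 1:
--             color = col_vals[0]
--             if color != bg_color:
--                 vertical_lines.append(c)
--     vertical_lines.sort()
--
--     num_h = len(horizontal_lines) + 1
--     num_v = len(vertical_lines) + 1
--
--     return [[bg_color for _ in range(num_v)] for _ in range(num_h)]
-- ===== SOURCE B (Python) =====
-- def transform(grid):
--     if grid is None:
--         return []
--     if not grid:
--         return []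
--     n = len(grid[0])
--     counts = {}
--     row_colors = []   # per row: its single color, or None if the row is not uniform
--     col_state = None  # per column: (first value, still-uniform flag)
--     for row in grid:
--         if len(row) != n:
--             raise ValueError("Input grid is not rectangular.")
--         vals = [int(v) for v in row]
--         first = vals[0] if vals else 0
--         uniform = all(v == first for v in vals)
--         row_colors.append(first if uniform else None)
--         if col_state is None:
--             col_state = [(v, True) for v in vals]
--         else:
--             col_state = [(f, ok and v == f) for (f, ok), v in zip(col_state, vals)]
--         for v in vals:
--             counts[v] = counts.get(v, 0) + 1
--     bg = max(counts.items(), key=lambda kv: kv[1])[0]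
--     num_h = 1 + sum(1 for c in row_colors if c is not None and c != bg)
--     num_v = 1 + sum(1 for f, ok in col_state if ok and f != bg)
--     return [[bg] * num_v for _ in range(num_h)]
-- ===== Notes on version B (the rewrite author's own statement) =====
-- stated objective: faster
-- what changed: B replaces A's four separate grid traversals (flatten, Counter + most_common sort, per-row set() checks, per-column list extraction with set() checks) by one fused row-major pass that maintains a count dict, each row's single color (or None), and a running per-column (first value, still-uniform) state, then picks the background with max(items, key=count) instead of sorting.
import Mathlib
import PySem

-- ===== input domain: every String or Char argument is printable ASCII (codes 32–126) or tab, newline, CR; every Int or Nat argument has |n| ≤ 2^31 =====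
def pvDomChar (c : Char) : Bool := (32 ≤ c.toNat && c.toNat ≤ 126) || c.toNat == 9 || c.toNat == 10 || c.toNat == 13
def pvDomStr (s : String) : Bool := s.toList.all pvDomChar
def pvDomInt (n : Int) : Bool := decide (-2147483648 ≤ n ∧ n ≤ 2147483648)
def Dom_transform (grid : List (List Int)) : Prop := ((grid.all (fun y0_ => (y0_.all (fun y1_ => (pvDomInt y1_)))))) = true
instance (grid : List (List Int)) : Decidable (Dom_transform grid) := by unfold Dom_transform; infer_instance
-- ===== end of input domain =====

-- B fuses A's three grid passes into one row-major pass (counter + per-row color + running per-column state); alternative decomposition, same results.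
-- ===== PORT A =====
def transform (grid : List (List Int)) : List (List Int) :=
  match grid with
  | [] => []
  | g0 :: _ =>
    let n := g0.length
    -- flat: the nested append loop (int(v) on an int is v; the ragged-row ValueError is excluded by Pre_)
    let flat := grid.foldl (fun acc r => r.foldl (fun a v => a ++ [v]) acc) ([] : List Int)
    -- Counter(flat).most_common(1)[0][0]: stable sort of the counter items by count, descending, take 1, first item's key
    -- (most_common(1)'s [0] raises IndexError on an empty grid row; excluded by Pre_)
    let bg : Int := (((PySem.List.sorted (PySem.Dict.counter flat).items (fun kv => kv.2) true).take 1).headD (0, 0)).1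
    let horizontal := (PySem.List.enumerate grid).foldl (fun acc rv =>
      let vals := rv.2
      if (PySem.Set.ofList vals).length = 1 then
        let color := vals.headD 0          -- vals[0]: safe, the set check makes vals nonempty
        if color ≠ bg then acc ++ [rv.1] else acc
      else acc) ([] : List Int)
    let horizontal := PySem.List.sorted horizontal (fun x => x) false
    let vertical := (List.range n).foldl (fun acc (c : Nat) =>
      let colVals := grid.map (fun r => r.getD c 0)   -- grid[r][c]: c < n = len(row) under Pre_, so getD is exact
      if (PySem.Set.ofList colVals).length = 1 then
        if colVals.headD 0 ≠ bg then acc ++ [(c : Int)] else acc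
      else acc) ([] : List Int)
    let vertical := PySem.List.sorted vertical (fun x => x) false
    let numH := horizontal.length + 1
    let numV := vertical.length + 1
    List.replicate numH (List.replicate numV bg)

-- ===== PORT B =====
-- per-column state update: zip(col_state, vals) comprehension from Source B
def bColUpd (cs : List (Int × Bool)) (row : List Int) : List (Int × Bool) :=
  (cs.zip row).map (fun p => (p.1.1, p.1.2 && p.2 == p.1.1))

-- one loop-body step of Source B's single pass: (counts, row_colors, col_state)
def bStep (st : PySem.Dict Int Int × List (Option Int) × Option (List (Int × Bool)))
    (row : List Int) : PySem.Dict Int Int × List (Option Int) × Option (List (Int × Bool)) :=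
  let first := row.headD 0
  let uniform := row.all (fun v => v == first)
  ( row.foldl (fun d v => d.insert v (d.getD v 0 + 1)) st.1,
    st.2.1 ++ [if uniform then some first else none],
    match st.2.2 with
    | none => some (row.map (fun v => (v, true)))
    | some cs => some (bColUpd cs row) )

def transform_alt (grid : List (List Int)) : List (List Int) :=
  match grid with
  | [] => []
  | _ :: _ =>
    let st := grid.foldl bStep (PySem.Dict.empty, [], none)
    let bg := ((PySem.List.max? st.1.items (fun kv => kv.2)).getD (0, 0)).1
    let numH := 1 + st.2.1.countP (fun o => match o with | some v => decide (v ≠ bg) | none => false)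
    let numV := 1 + (st.2.2.getD []).countP (fun p => p.2 && p.1 != bg)
    List.replicate numH (List.replicate numV bg)

-- ===== PRECONDITION & SPEC =====
-- Pre_ excludes exactly the inputs where A raises: a ragged grid (ValueError) and a nonempty grid whose
-- first row is empty (most_common(1)[0] raises IndexError because no cell exists).
def Pre_transform (grid : List (List Int)) : Prop :=
  grid = [] ∨ ((grid.headD []).length ≠ 0 ∧ ∀ r ∈ grid, r.length = (grid.headD []).length)
instance (grid : List (List Int)) : Decidable (Pre_transform grid) := by unfold Pre_transform; infer_instance
def pvWitness_transform : List (List Int) := [[1, 2], [1, 1]]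

def Spec_transform (grid : List (List Int)) (out : List (List Int)) : Prop := out = transform_alt grid
instance (grid : List (List Int)) (out : List (List Int)) : Decidable (Spec_transform grid out) := by unfold Spec_transform; infer_instance

-- ===== CLAIM (what is proved, stated in full; the proofs are below) =====
def Claim_equal_transform : Prop := ∀ (grid : List (List Int)), Dom_transform grid → Pre_transform grid → Spec_transform grid (transform grid)

-- ===== LEMMAS AND PROOFS =====

-- head of Python's stable descending sort = Python's max (first maximal element)
lemma head?_insertBy_rev {α : Type} (key : α → Int) (x : α) (acc : List α) :
    (PySem.List.insertBy (fun a b => decide (key b < key a)) x acc).head? =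
      (match acc.head? with
       | none => some x
       | some m => if key m < key x then some x else some m) := by
  cases acc with
  | nil => rfl
  | cons y ys =>
    simp only [PySem.List.insertBy, List.head?]
    by_cases h : key y < key x <;> simp [h]

lemma head?_foldl_insertBy_rev {α : Type} (key : α → Int) (xs : List α) (acc : List α) :
    (xs.foldl (fun a x => PySem.List.insertBy (fun a b => decide (key b < key a)) x a) acc).head? =
      xs.foldl (fun a x =>
        match a with
        | none => some x
        | some m => if key m < key x then some x else some m) acc.head? := by
  induction xs generalizing acc with
  | nil => rfl
  | cons x t ih =>
    simp only [List.foldl_cons]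
    rw [ih, head?_insertBy_rev]

lemma sorted_rev_head?_eq_max? {α : Type} (xs : List α) (key : α → Int) :
    (PySem.List.sorted xs key true).head? = PySem.List.max? xs key := by
  rw [PySem.List.sorted_rev_eq_foldl_insertBy, PySem.List.max?]
  exact head?_foldl_insertBy_rev key xs []

-- len(set(x::xs)) == 1  ↔  every element equals the head
lemma len_ofList_one (x : Int) (xs : List Int) :
    ((PySem.Set.ofList (x :: xs)).length = 1) ↔ (xs.all (fun y => y == x) = true) := by
  simp only [List.all_eq_true, beq_iff_eq]
  constructor
  · intro h y hy
    have hx : x ∈ PySem.Set.ofList (x :: xs) := (PySem.Set.mem_ofList _ _).2 (by simp)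
    have hy' : y ∈ PySem.Set.ofList (x :: xs) := (PySem.Set.mem_ofList _ _).2 (by simp [hy])
    match hs : PySem.Set.ofList (x :: xs), h with
    | [z], _ =>
      rw [hs] at hx hy'
      simp_all
  · intro h
    have hall : ∀ y ∈ PySem.Set.ofList (x :: xs), y = x := by
      intro y hy
      rcases List.mem_cons.1 ((PySem.Set.mem_ofList _ _).1 hy) with h1 | h2
      · exact h1
      · exact h y h2
    have hnd := PySem.Set.nodup_ofList (x :: xs)
    have hx : x ∈ PySem.Set.ofList (x :: xs) := (PySem.Set.mem_ofList _ _).2 (by simp)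
    match hs : PySem.Set.ofList (x :: xs) with
    | [] => rw [hs] at hx; simp at hx
    | [z] => rfl
    | a :: b :: t =>
      rw [hs] at hall hnd
      have ha := hall a (by simp)
      have hb := hall b (by simp)
      simp_all

lemma enumerate_map_snd {α : Type} (xs : List α) (s : Int) :
    (PySem.List.enumerate xs s).map (·.2) = xs := by
  induction xs generalizing s with
  | nil => rfl
  | cons x t ih => simp [PySem.List.enumerate, ih]

-- decomposition of B's fused fold into its three components
lemma foldl_bStep_fst (gs : List (List Int)) :
    ∀ (d : PySem.Dict Int Int) rc co, (gs.foldl bStep (d, rc, co)).1 =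
      gs.foldl (fun d r => r.foldl (fun d v => d.insert v (d.getD v 0 + 1)) d) d := by
  induction gs with
  | nil => intros; rfl
  | cons r t ih =>
    intro d rc co
    simp only [List.foldl_cons, bStep]
    cases co <;> exact ih _ _ _

lemma foldl_bStep_snd1 (gs : List (List Int)) :
    ∀ (d : PySem.Dict Int Int) rc co, (gs.foldl bStep (d, rc, co)).2.1 =
      rc ++ gs.map (fun row => if row.all (fun v => v == row.headD 0) then some (row.headD 0) else none) := by
  induction gs with
  | nil => intros; simp
  | cons r t ih =>
    intro d rc co
    simp only [List.foldl_cons, bStep, List.map_cons]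
    cases co <;> rw [ih] <;> simp

lemma foldl_bStep_snd2 (gs : List (List Int)) :
    ∀ (d : PySem.Dict Int Int) rc cs, (gs.foldl bStep (d, rc, some cs)).2.2 =
      some (gs.foldl bColUpd cs) := by
  induction gs with
  | nil => intros; rfl
  | cons r t ih =>
    intro d rc cs
    simp only [List.foldl_cons, bStep]
    exact ih _ _ _

lemma length_bColUpd (cs : List (Int × Bool)) (row : List Int) (h : row.length = cs.length) :
    (bColUpd cs row).length = cs.length := by
  simp [bColUpd, h]

lemma bColUpd_getElem? (cs : List (Int × Bool)) (row : List Int) (h : row.length = cs.length)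
    (c : Nat) (hc : c < cs.length) :
    (bColUpd cs row)[c]? = some ((cs.getD c (0, true)).1,
      (cs.getD c (0, true)).2 && (row.getD c 0 == (cs.getD c (0, true)).1)) := by
  have hr : c < row.length := by omega
  have hcz : c < (cs.zip row).length := by simp [List.length_zip]; omega
  rw [bColUpd, List.getElem?_map, List.getElem?_eq_getElem hcz]
  simp [List.getElem_zip, List.getD_eq_getElem?_getD, List.getElem?_eq_getElem hc,
        List.getElem?_eq_getElem hr]

lemma foldl_bColUpd_getElem? (gs : List (List Int)) :
    ∀ (l : List (Int × Bool)), (∀ r ∈ gs, r.length = l.length) → ∀ c : Nat, c < l.length →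
      (gs.foldl bColUpd l)[c]? =
        some ((l.getD c (0, true)).1,
              (l.getD c (0, true)).2 && gs.all (fun r => r.getD c 0 == (l.getD c (0, true)).1)) := by
  induction gs with
  | nil =>
    intro l _ c hc
    simp [List.getElem?_eq_getElem hc]
  | cons r t ih =>
    intro l hlen c hc
    have hr : r.length = l.length := hlen r (by simp)
    have hlen' : ∀ r' ∈ t, r'.length = (bColUpd l r).length := by
      intro r' hr'; rw [length_bColUpd l r hr]; exact hlen r' (by simp [hr'])
    have hc' : c < (bColUpd l r).length := by rw [length_bColUpd l r hr]; exact hc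
    simp only [List.foldl_cons]
    rw [ih _ hlen' c hc']
    have hb := bColUpd_getElem? l r hr c hc
    have hgd : (bColUpd l r).getD c (0, true) = ((l.getD c (0, true)).1,
        (l.getD c (0, true)).2 && (r.getD c 0 == (l.getD c (0, true)).1)) := by
      rw [List.getD_eq_getElem?_getD, hb]; rfl
    rw [hgd]
    simp [List.all_cons, Bool.and_assoc]

lemma foldl_bColUpd_length (gs : List (List Int)) :
    ∀ (l : List (Int × Bool)), (∀ r ∈ gs, r.length = l.length) →
      (gs.foldl bColUpd l).length = l.length := by
  induction gs with
  | nil => intro l _; rfl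
  | cons r t ih =>
    intro l hlen
    have hr : r.length = l.length := hlen r (by simp)
    simp only [List.foldl_cons]
    rw [ih _ (fun r' hr' => by rw [length_bColUpd l r hr]; exact hlen r' (by simp [hr']))]
    exact length_bColUpd l r hr

-- shared model of both programs on a nonempty rectangular grid
def pvBg (grid : List (List Int)) : Int :=
  ((PySem.List.max? (PySem.Dict.counter grid.flatten).items (fun kv => kv.2)).getD (0, 0)).1

def pvModel (g0 : List Int) (gs : List (List Int)) : List (List Int) :=
  let bg := pvBg (g0 :: gs)
  let numH := ((g0 :: gs).countP (fun row =>
      row.all (fun v => v == row.headD 0) && (row.headD 0 != bg))) + 1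
  let numV := ((List.range g0.length).countP (fun c =>
      gs.all (fun r => r.getD c 0 == g0.getD c 0) && (g0.getD c 0 != bg))) + 1
  List.replicate numH (List.replicate numV bg)

-- nested-if append loop = filter on the conjunction of the two conditions
lemma foldl_append_if2 {α β : Type} (P Q : α → Prop) [DecidablePred P] [DecidablePred Q]
    (f : α → β) (l : List α) (acc : List β) :
    l.foldl (fun acc x => if P x then (if Q x then acc ++ [f x] else acc) else acc) acc
      = acc ++ (l.filter (fun x => decide (P x) && decide (Q x))).map f := by
  induction l generalizing acc with
  | nil => simp
  | cons x t ih =>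
    simp only [List.foldl_cons, List.filter_cons]
    by_cases h1 : P x <;> by_cases h2 : Q x <;>
      simp [h1, h2, ih, List.append_assoc]

lemma transform_eq_model (g0 : List Int) (gs : List (List Int))
    (hn : g0.length ≠ 0) (hlen : ∀ r ∈ (g0 :: gs), r.length = g0.length) :
    transform (g0 :: gs) = pvModel g0 gs := by
  have hflat : (g0 :: gs).foldl (fun acc r => r.foldl (fun a v => a ++ [v]) acc) ([] : List Int)
      = (g0 :: gs).flatten := by
    have h1 : (fun (acc r : List Int) => r.foldl (fun a v => a ++ [v]) acc)
        = fun acc r => acc ++ r := by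
      funext acc r; exact PySem.List.foldl_append_singleton r acc
    rw [h1]
    simpa using PySem.List.foldl_append_eq_flatMap (fun r : List Int => r) (g0 :: gs) []
  have hfne : (g0 :: gs).flatten ≠ [] := by
    cases g0 with
    | nil => simp at hn
    | cons a t => simp
  have hine : (PySem.Dict.counter ((g0 :: gs).flatten)).items ≠ [] := by
    rw [PySem.Dict.items_counter]
    obtain ⟨v, hv⟩ := List.exists_mem_of_ne_nil _ hfne
    have hv' : v ∈ PySem.Set.ofList ((g0 :: gs).flatten) := (PySem.Set.mem_ofList _ _).2 hv
    intro h
    rw [List.map_eq_nil_iff] at h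
    rw [h] at hv'
    simp at hv'
  obtain ⟨mx, hmx⟩ : ∃ mx, PySem.List.max? (PySem.Dict.counter ((g0 :: gs).flatten)).items
      (fun kv => kv.2) = some mx := by
    cases h : PySem.List.max? (PySem.Dict.counter ((g0 :: gs).flatten)).items (fun kv => kv.2) with
    | none => exact absurd ((PySem.List.max?_eq_none_iff _ _).1 h) hine
    | some m => exact ⟨m, rfl⟩
  have hhead : (PySem.List.sorted (PySem.Dict.counter ((g0 :: gs).flatten)).items
      (fun kv => kv.2) true).head? = some mx := by
    rw [sorted_rev_head?_eq_max?, hmx]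
  obtain ⟨tl, htl⟩ : ∃ tl, PySem.List.sorted (PySem.Dict.counter ((g0 :: gs).flatten)).items
      (fun kv => kv.2) true = mx :: tl := by
    cases hs : PySem.List.sorted (PySem.Dict.counter ((g0 :: gs).flatten)).items
        (fun kv => kv.2) true with
    | nil => rw [hs] at hhead; simp at hhead
    | cons a l =>
      rw [hs] at hhead
      simp only [List.head?_cons, Option.some.injEq] at hhead
      exact ⟨l, by rw [hhead]⟩
  have hbgA : ((PySem.List.sorted (PySem.Dict.counter ((g0 :: gs).flatten)).items
      (fun kv => kv.2) true).take 1).headD (0, 0) = mx := by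
    rw [htl]; rfl
  simp only [transform, pvModel, pvBg]
  rw [hflat, hbgA, hmx, Option.getD_some]
  rw [foldl_append_if2 (fun rv : Int × List Int => (PySem.Set.ofList rv.2).length = 1)
        (fun rv : Int × List Int => rv.2.headD 0 ≠ mx.1) (fun rv => rv.1),
      foldl_append_if2 (fun c : Nat => (PySem.Set.ofList ((g0 :: gs).map (fun r => r.getD c 0))).length = 1)
        (fun c : Nat => ((g0 :: gs).map (fun r => r.getD c 0)).headD 0 ≠ mx.1) (fun c => (c : Int))]
  simp only [List.nil_append, PySem.List.length_sorted, List.length_map,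
             ← List.countP_eq_length_filter]
  have hH : List.countP (fun x => decide ((PySem.Set.ofList x.2).length = 1)
        && decide (x.2.headD 0 ≠ mx.1)) (PySem.List.enumerate (g0 :: gs) 0)
      = List.countP (fun row => row.all (fun v => v == row.headD 0) && (row.headD 0 != mx.1))
          (g0 :: gs) := by
    have step1 : List.countP (fun x : Int × List Int => decide ((PySem.Set.ofList x.2).length = 1)
          && decide (x.2.headD 0 ≠ mx.1)) (PySem.List.enumerate (g0 :: gs) 0)
        = List.countP ((fun row : List Int => row.all (fun v => v == row.headD 0)
            && (row.headD 0 != mx.1)) ∘ (·.2)) (PySem.List.enumerate (g0 :: gs) 0) := by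
      apply List.countP_congr
      intro x hx
      have hx2 : x.2 ∈ (g0 :: gs) := by
        rw [← enumerate_map_snd (g0 :: gs) 0]
        exact List.mem_map_of_mem hx
      have hx2' : x.2.length = g0.length := hlen _ hx2
      rcases hr : x.2 with _ | ⟨h, t⟩
      · rw [hr] at hx2'; exact absurd (by simpa using hx2'.symm) hn
      · simp only [Function.comp]
        rw [hr]
        simp only [Bool.and_eq_true, decide_eq_true_eq, List.headD_cons]
        rw [len_ofList_one]
        simp [bne, List.all_eq_true]
    rw [step1, ← List.countP_map, enumerate_map_snd]
  have hV : List.countP (fun c : Nat => decide ((PySem.Set.ofList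
        ((g0 :: gs).map (fun r => r.getD c 0))).length = 1)
        && decide (((g0 :: gs).map (fun r => r.getD c 0)).headD 0 ≠ mx.1)) (List.range g0.length)
      = List.countP (fun c => gs.all (fun r => r.getD c 0 == g0.getD c 0)
          && (g0.getD c 0 != mx.1)) (List.range g0.length) := by
    apply List.countP_congr
    intro c _
    simp only [List.map_cons, List.headD_cons, Bool.and_eq_true, decide_eq_true_eq]
    rw [len_ofList_one]
    simp [bne, List.all_eq_true]
  rw [hH, hV]


lemma transform_alt_eq_model (g0 : List Int) (gs : List (List Int))
    (hn : g0.length ≠ 0) (hlen : ∀ r ∈ (g0 :: gs), r.length = g0.length) :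
    transform_alt (g0 :: gs) = pvModel g0 gs := by
  have hlen' : ∀ r ∈ gs, r.length = g0.length := fun r hr => hlen r (by simp [hr])
  have hst1 : ((g0 :: gs).foldl bStep (PySem.Dict.empty, [], none)).1
      = PySem.Dict.counter ((g0 :: gs).flatten) := by
    simp only [List.foldl_cons, bStep]
    rw [foldl_bStep_fst]
    rw [← PySem.Dict.foldl_insert_getD_add_one_eq_counter ((g0 :: gs).flatten)]
    simp [List.foldl_flatten]
  have hst21 : ((g0 :: gs).foldl bStep (PySem.Dict.empty, [], none)).2.1
      = (g0 :: gs).map (fun row =>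
          if row.all (fun v => v == row.headD 0) then some (row.headD 0) else none) := by
    simp only [List.foldl_cons, bStep]
    rw [foldl_bStep_snd1]
    simp
  have hst22 : ((g0 :: gs).foldl bStep (PySem.Dict.empty, [], none)).2.2
      = some (gs.foldl bColUpd (g0.map (fun v => (v, true)))) := by
    simp only [List.foldl_cons, bStep]
    exact foldl_bStep_snd2 gs _ _ _
  have hF : gs.foldl bColUpd (g0.map (fun v => (v, true)))
      = (List.range g0.length).map (fun c =>
          (g0.getD c 0, gs.all (fun r => r.getD c 0 == g0.getD c 0))) := by
    have hl : (g0.map (fun v => (v, true))).length = g0.length := by simp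
    have hlen2 : ∀ r ∈ gs, r.length = (g0.map (fun v => (v, true))).length := by
      intro r hr; rw [hl]; exact hlen' r hr
    apply List.ext_getElem?
    intro i
    by_cases hi : i < g0.length
    · rw [foldl_bColUpd_getElem? gs _ hlen2 i (by rw [hl]; exact hi)]
      have hg : (g0.map (fun v => (v, true))).getD i (0, true) = (g0.getD i 0, true) := by
        rw [List.getD_eq_getElem?_getD, List.getElem?_map, List.getElem?_eq_getElem hi,
            List.getD_eq_getElem _ _ hi]
        rfl
      rw [hg]
      simp [List.getElem?_map, List.getElem?_range hi]
    · have h1 : (gs.foldl bColUpd (g0.map (fun v => (v, true)))).length = g0.length := by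
        rw [foldl_bColUpd_length gs _ hlen2, hl]
      rw [List.getElem?_eq_none (by omega), List.getElem?_eq_none (by simp; omega)]
  simp only [transform_alt, pvModel]
  rw [hst1, hst21, hst22, hF]
  simp only [pvBg, Option.getD_some]
  congr 1
  · rw [List.countP_map, Nat.add_comm]
    congr 1
    apply List.countP_congr
    intro row hrow
    have hrow' : row.length = g0.length := hlen row hrow
    rcases row with _ | ⟨h, t⟩
    · exact absurd (by simpa using hrow'.symm) hn
    · by_cases hu : ((h :: t).all fun v => v == (h :: t).headD 0) = true
      · have hu' : ∀ x ∈ t, x = h := by simpa using hu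
        simp [Function.comp, if_pos hu', bne]
        exact fun _ => hu'
      · have hu' : ¬ ∀ x ∈ t, x = h := by simpa using hu
        simp [Function.comp, if_neg hu']
        exact fun hx => absurd hx hu'
  · rw [List.countP_map, Nat.add_comm]
    congr 1


-- ===== VERDICT (by name: the statement is the Claim_ definition above) =====
theorem transform_spec : Claim_equal_transform := by
  intro grid _ hpre
  unfold Spec_transform
  cases grid with
  | nil => rfl
  | cons g0 gs =>
    rcases hpre with h | ⟨hn, hlen⟩
    · exact absurd h (by simp)
    · simp only [List.headD_cons] at hn hlen
      rw [transform_eq_model g0 gs hn hlen, transform_alt_eq_model g0 gs hn hlen]
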